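-- pv_equiv track=rewrite | github.com/colinw54/kattis | pebble_solitaire.py | dp
-- ===== SOURCE A (Python) =====
-- uniqueStates = {}
--
-- def dp(board):
--     if board in uniqueStates:
--         return uniqueStates[board]
--
--     moves = []
--     for i in range(10):
--         #If the window contains 2 pebbles and a space, add to moves
--         window = board[i:i+3]
--         if window == "oo-":
--             moves.append(board[0:i] + "--o" + board[i+3:])
--         elif window == "-oo":
--             moves.append(board[0:i] + "o--" + board[i+3:])
--
--     if not moves:
--         count = board.count("o")
--         uniqueStates[board] = count
--         return count
--     else:
--         count = min([dp(move) for move in moves])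
--         uniqueStates[board] = count
--         return count
-- ===== SOURCE B (Python) =====
-- # Iterative DFS with an explicit stack and a running minimum over terminal boards
-- # (instead of A's memoized recursion folding mins up the call tree).
--
-- def dp(board):
--     best = None
--     stack = [board]
--     while stack:
--         state = stack.pop()
--         moves = []
--         for i in range(min(10, len(state) - 2)):
--             a, b, c = state[i], state[i + 1], state[i + 2]
--             if a == 'o' and b == 'o' and c == '-':
--                 moves.append(state[:i] + "--o" + state[i + 3:])
--             elif a == '-' and b == 'o' and c == 'o':
--                 moves.append(state[:i] + "o--" + state[i + 3:])
--         if moves: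
--             stack.extend(moves)
--         else:
--             c = state.count("o")
--             if best is None or c < best:
--                 best = c
--     return best
-- ===== Notes on version B (the rewrite author's own statement) =====
-- stated objective: alternative
-- what changed: A's memoized top-down recursion that folds min() up the call tree is replaced by an iterative DFS with an explicit stack and a running minimum accumulated over the terminal boards it reaches (and B only scans the min(10, len-2) window positions that can actually hold a 3-character window, testing characters directly instead of comparing slices).
import Mathlib
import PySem

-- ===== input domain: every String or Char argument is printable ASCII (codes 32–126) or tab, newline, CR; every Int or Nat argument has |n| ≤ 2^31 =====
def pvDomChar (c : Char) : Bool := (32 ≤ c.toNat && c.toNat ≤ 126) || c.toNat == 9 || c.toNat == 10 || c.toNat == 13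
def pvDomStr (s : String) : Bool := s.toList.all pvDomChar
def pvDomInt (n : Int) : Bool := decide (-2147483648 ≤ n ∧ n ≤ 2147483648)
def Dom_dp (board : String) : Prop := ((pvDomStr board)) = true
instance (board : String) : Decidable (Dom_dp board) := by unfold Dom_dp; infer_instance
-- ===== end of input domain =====

-- B replaces A's memoized recursion (min folded up the call tree) by an explicit-stack DFS
-- that keeps a running minimum over the terminal boards it reaches (objective: alternative).
-- A's global dict `uniqueStates` is a pure memo cache (the cached value is always the value
-- the recursion itself computes), so the port of A is the memo-free recursion.

-- ===== PORT A =====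
-- A's moves-building loop: `for i in range(10): window = board[i:i+3]; …`
def succsA (b : List Char) : List (List Char) :=
  (PySem.List.pyRange 0 10 1).foldl (fun acc i =>
    if PySem.List.slice b (some i) (some (i + 3)) = ['o', 'o', '-'] then
      acc ++ [PySem.List.slice b (some 0) (some i) ++ ['-', '-', 'o'] ++
              PySem.List.slice b (some (i + 3)) none]
    else if PySem.List.slice b (some i) (some (i + 3)) = ['-', 'o', 'o'] then
      acc ++ [PySem.List.slice b (some 0) (some i) ++ ['o', '-', '-'] ++
              PySem.List.slice b (some (i + 3)) none]
    else acc) []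

-- the same loop as one flatMap (used by the termination arguments below)

-- A's recursion, made total with a fuel counter: every move removes a pebble, so
-- `count('o') + 1` units of fuel always suffice (proved below); the 0-fuel branch is
-- never reached on the fuel `dp` supplies
def dpA : Nat → List Char → Int
  | 0, _ => 0
  | fuel + 1, b =>
    let moves := succsA b
    if moves = [] then ((PySem.Chars.count b ['o'] : Nat) : Int)
    else (PySem.List.min? (moves.map (dpA fuel)) (fun x => x)).getD 0

def dp (board : String) : Int := dpA (board.toList.count 'o' + 1) board.toList

-- ===== PORT B =====
-- B's moves loop: `for i in range(min(10, len(state) - 2)):` with direct character tests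
-- B's moves loop: `for i in range(min(10, len(state) - 2)):` with direct character tests
def succsB (s : List Char) : List (List Char) :=
  (PySem.List.pyRange 0 (min 10 ((s.length : Int) - 2)) 1).foldl (fun acc i =>
    if PySem.List.pyGetD s i ' ' = 'o' ∧ PySem.List.pyGetD s (i + 1) ' ' = 'o' ∧
       PySem.List.pyGetD s (i + 2) ' ' = '-' then
      acc ++ [PySem.List.slice s none (some i) ++ ['-', '-', 'o'] ++
              PySem.List.slice s (some (i + 3)) none]
    else if PySem.List.pyGetD s i ' ' = '-' ∧ PySem.List.pyGetD s (i + 1) ' ' = 'o' ∧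
            PySem.List.pyGetD s (i + 2) ' ' = 'o' then
      acc ++ [PySem.List.slice s none (some i) ++ ['o', '-', '-'] ++
              PySem.List.slice s (some (i + 3)) none]
    else acc) []

-- B's loop as one flatMap over its (possibly shorter) index range

-- the DFS loop of B: stack head = Python's stack top; `stack.extend(moves)` makes the
-- LAST appended move the next popped one, i.e. the reversed move list goes on top.
-- Fuel makes the while-loop total: the iteration count is bounded by the stack measure
-- Σ 11^count(state) (proved below), so the fuel `dp_alt` supplies is never exhausted
def goB : Nat → List (List Char) → Option Int → Option Int
  | 0, _, best => best
  | _ + 1, [], best => best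
  | fuel + 1, s :: rest, best =>
    if succsB s = [] then
      goB fuel rest
        (match best with
         | none => some ((PySem.Chars.count s ['o'] : Nat) : Int)
         | some v =>
             if ((PySem.Chars.count s ['o'] : Nat) : Int) < v then
               some ((PySem.Chars.count s ['o'] : Nat) : Int)
             else some v)
    else goB fuel ((succsB s).reverse ++ rest) best

-- `best` is provably `some` when the loop ends (the seed always reaches a terminal state);
-- `.getD 0` only realises the Int type of the `best` Python returns
def dp_alt (board : String) : Int :=
  (goB (11 ^ board.toList.count 'o' + 1) [board.toList] none).getD 0

-- ===== PRECONDITION & SPEC =====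
def Spec_dp (board : String) (out : Int) : Prop := out = dp_alt board
instance (board : String) (out : Int) : Decidable (Spec_dp board out) := by unfold Spec_dp; infer_instance

-- ===== CLAIM (what is proved, stated in full; the proofs are below) =====
def Claim_equal_dp : Prop := ∀ (board : String), Dom_dp board → Spec_dp board (dp board)

-- ===== LEMMAS AND PROOFS =====

-- the same loop as one flatMap (used by the termination arguments below)
lemma succsA_eq_flatMap (b : List Char) :
    succsA b = (PySem.List.pyRange 0 10 1).flatMap (fun i =>
      if PySem.List.slice b (some i) (some (i + 3)) = ['o', 'o', '-'] then
        [PySem.List.slice b (some 0) (some i) ++ ['-', '-', 'o'] ++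
         PySem.List.slice b (some (i + 3)) none]
      else if PySem.List.slice b (some i) (some (i + 3)) = ['-', 'o', 'o'] then
        [PySem.List.slice b (some 0) (some i) ++ ['o', '-', '-'] ++
         PySem.List.slice b (some (i + 3)) none]
      else []) := by
  unfold succsA
  have hfg : ∀ (acc : List (List Char)), ∀ i ∈ PySem.List.pyRange 0 10 1,
      (if PySem.List.slice b (some i) (some (i + 3)) = ['o', 'o', '-'] then
        acc ++ [PySem.List.slice b (some 0) (some i) ++ ['-', '-', 'o'] ++
              PySem.List.slice b (some (i + 3)) none]
      else if PySem.List.slice b (some i) (some (i + 3)) = ['-', 'o', 'o'] then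
        acc ++ [PySem.List.slice b (some 0) (some i) ++ ['o', '-', '-'] ++
              PySem.List.slice b (some (i + 3)) none]
      else acc) =
      acc ++ (if PySem.List.slice b (some i) (some (i + 3)) = ['o', 'o', '-'] then
        [PySem.List.slice b (some 0) (some i) ++ ['-', '-', 'o'] ++
         PySem.List.slice b (some (i + 3)) none]
      else if PySem.List.slice b (some i) (some (i + 3)) = ['-', 'o', 'o'] then
        [PySem.List.slice b (some 0) (some i) ++ ['o', '-', '-'] ++
         PySem.List.slice b (some (i + 3)) none]
      else []) := by
    intro acc i _; split_ifs <;> simp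
  rw [PySem.List.foldl_congr_mem _ _ _ _ hfg, PySem.List.foldl_append_eq_flatMap]
  simp

-- a full window of b: b[k:k+3] is the three characters at k, k+1, k+2

-- a full window of b: b[k:k+3] is the three characters at k, k+1, k+2
lemma window3 (s : List Char) (k : Nat) (h : k + 2 < s.length) :
    (s.drop k).take 3 = [s.getD k ' ', s.getD (k + 1) ' ', s.getD (k + 2) ' '] := by
  rw [List.drop_eq_getElem_cons (show k < s.length by omega),
      List.drop_eq_getElem_cons (show k + 1 < s.length by omega),
      List.drop_eq_getElem_cons (show k + 1 + 1 < s.length by omega),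
      List.getD_eq_getElem s ' ' (show k < s.length by omega),
      List.getD_eq_getElem s ' ' (show k + 1 < s.length by omega),
      List.getD_eq_getElem s ' ' (show k + 2 < s.length by omega)]
  rfl

-- a short window (fewer than 3 characters) never matches either pattern

-- a short window (fewer than 3 characters) never matches either pattern
lemma window_short (s : List Char) (k : Nat) (h : s.length ≤ k + 2) :
    (s.drop k).take 3 ≠ ['o', 'o', '-'] ∧ (s.drop k).take 3 ≠ ['-', 'o', 'o'] := by
  constructor <;> intro heq <;>
    have hl := congrArg List.length heq <;>
    simp [List.length_take, List.length_drop] at hl <;> omega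

-- every move removes exactly one pebble (termination measure for dp's recursion)

-- every move removes exactly one pebble (termination measure for dp's recursion)
lemma succsA_count (b m : List Char) (hm : m ∈ succsA b) :
    m.count 'o' + 1 = b.count 'o' := by
  rw [succsA_eq_flatMap, List.mem_flatMap] at hm
  obtain ⟨i, hi, hmem⟩ := hm
  rw [PySem.List.mem_pyRange_one] at hi
  obtain ⟨h0, _⟩ := hi
  obtain ⟨k, rfl⟩ : ∃ k : Nat, i = (k : Int) := ⟨i.toNat, (Int.toNat_of_nonneg h0).symm⟩
  rw [show ((k : Int) + 3) = ((k + 3 : Nat) : Int) by push_cast; ring] at hmem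
  rw [PySem.List.slice_natCast, PySem.List.slice_from_natCast] at hmem
  simp only [PySem.List.slice_zero_start, PySem.List.slice_to_natCast] at hmem
  rw [show k + 3 - k = 3 by omega] at hmem
  by_cases hk : k + 2 < b.length
  · have hw : b.drop k = (b.drop k).take 3 ++ b.drop (k + 3) := by
      conv_lhs => rw [← List.take_append_drop 3 (b.drop k)]
      rw [List.drop_drop]
    have hsplit : b = b.take k ++ b.drop k := (List.take_append_drop k b).symm
    split_ifs at hmem with h1 h2
    · simp only [List.mem_singleton] at hmem
      subst hmem
      rw [h1] at hw
      conv_rhs => rw [hsplit, hw]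
      simp [List.count_append]
      omega
    · simp only [List.mem_singleton] at hmem
      subst hmem
      rw [h2] at hw
      conv_rhs => rw [hsplit, hw]
      simp [List.count_append]
      omega
    · simp at hmem
  · split_ifs at hmem with h1 h2
    · exact absurd h1 (window_short b k (by omega)).1
    · exact absurd h2 (window_short b k (by omega)).2
    · simp at hmem

-- at most one move per window position

-- at most one move per window position
lemma succsA_len_le (b : List Char) : (succsA b).length ≤ 10 := by
  rw [succsA_eq_flatMap, List.length_flatMap]
  have hb : ∀ x ∈ (PySem.List.pyRange 0 10 1).map (fun i =>
      (if PySem.List.slice b (some i) (some (i + 3)) = ['o', 'o', '-'] then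
        [PySem.List.slice b (some 0) (some i) ++ ['-', '-', 'o'] ++
         PySem.List.slice b (some (i + 3)) none]
      else if PySem.List.slice b (some i) (some (i + 3)) = ['-', 'o', 'o'] then
        [PySem.List.slice b (some 0) (some i) ++ ['o', '-', '-'] ++
         PySem.List.slice b (some (i + 3)) none]
      else []).length), x ≤ 1 := by
    intro x hx
    simp only [List.mem_map] at hx
    obtain ⟨i, _, rfl⟩ := hx
    split_ifs <;> simp
  have := List.sum_le_card_nsmul _ 1 hb
  simpa [PySem.List.length_pyRange_one] using this

-- B's loop as one flatMap over its (possibly shorter) index range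
lemma succsB_eq_flatMap (s : List Char) :
    succsB s = (PySem.List.pyRange 0 (min 10 ((s.length : Int) - 2)) 1).flatMap (fun i =>
      if PySem.List.pyGetD s i ' ' = 'o' ∧ PySem.List.pyGetD s (i + 1) ' ' = 'o' ∧
         PySem.List.pyGetD s (i + 2) ' ' = '-' then
        [PySem.List.slice s none (some i) ++ ['-', '-', 'o'] ++
         PySem.List.slice s (some (i + 3)) none]
      else if PySem.List.pyGetD s i ' ' = '-' ∧ PySem.List.pyGetD s (i + 1) ' ' = 'o' ∧
              PySem.List.pyGetD s (i + 2) ' ' = 'o' then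
        [PySem.List.slice s none (some i) ++ ['o', '-', '-'] ++
         PySem.List.slice s (some (i + 3)) none]
      else []) := by
  unfold succsB
  have hfg : ∀ (acc : List (List Char)), ∀ i ∈ PySem.List.pyRange 0 (min 10 ((s.length : Int) - 2)) 1,
      (if PySem.List.pyGetD s i ' ' = 'o' ∧ PySem.List.pyGetD s (i + 1) ' ' = 'o' ∧
          PySem.List.pyGetD s (i + 2) ' ' = '-' then
        acc ++ [PySem.List.slice s none (some i) ++ ['-', '-', 'o'] ++
                PySem.List.slice s (some (i + 3)) none]
      else if PySem.List.pyGetD s i ' ' = '-' ∧ PySem.List.pyGetD s (i + 1) ' ' = 'o' ∧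
              PySem.List.pyGetD s (i + 2) ' ' = 'o' then
        acc ++ [PySem.List.slice s none (some i) ++ ['o', '-', '-'] ++
                PySem.List.slice s (some (i + 3)) none]
      else acc) =
      acc ++ (if PySem.List.pyGetD s i ' ' = 'o' ∧ PySem.List.pyGetD s (i + 1) ' ' = 'o' ∧
          PySem.List.pyGetD s (i + 2) ' ' = '-' then
        [PySem.List.slice s none (some i) ++ ['-', '-', 'o'] ++
         PySem.List.slice s (some (i + 3)) none]
      else if PySem.List.pyGetD s i ' ' = '-' ∧ PySem.List.pyGetD s (i + 1) ' ' = 'o' ∧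
              PySem.List.pyGetD s (i + 2) ' ' = 'o' then
        [PySem.List.slice s none (some i) ++ ['o', '-', '-'] ++
         PySem.List.slice s (some (i + 3)) none]
      else []) := by
    intro acc i _; split_ifs <;> simp
  rw [PySem.List.foldl_congr_mem _ _ _ _ hfg, PySem.List.foldl_append_eq_flatMap]
  simp

-- on a full window A's slice test and B's three character tests build the same moves

-- on a full window A's slice test and B's three character tests build the same moves
lemma movesAB_full (s : List Char) (k : Nat) (hk : k + 2 < s.length) :
    (if PySem.List.slice s (some (k : Int)) (some ((k : Int) + 3)) = ['o', 'o', '-'] then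
      [PySem.List.slice s (some 0) (some (k : Int)) ++ ['-', '-', 'o'] ++
       PySem.List.slice s (some ((k : Int) + 3)) none]
    else if PySem.List.slice s (some (k : Int)) (some ((k : Int) + 3)) = ['-', 'o', 'o'] then
      [PySem.List.slice s (some 0) (some (k : Int)) ++ ['o', '-', '-'] ++
       PySem.List.slice s (some ((k : Int) + 3)) none]
    else []) =
    (if PySem.List.pyGetD s (k : Int) ' ' = 'o' ∧ PySem.List.pyGetD s ((k : Int) + 1) ' ' = 'o' ∧
        PySem.List.pyGetD s ((k : Int) + 2) ' ' = '-' then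
      [PySem.List.slice s none (some (k : Int)) ++ ['-', '-', 'o'] ++
       PySem.List.slice s (some ((k : Int) + 3)) none]
    else if PySem.List.pyGetD s (k : Int) ' ' = '-' ∧ PySem.List.pyGetD s ((k : Int) + 1) ' ' = 'o' ∧
            PySem.List.pyGetD s ((k : Int) + 2) ' ' = 'o' then
      [PySem.List.slice s none (some (k : Int)) ++ ['o', '-', '-'] ++
       PySem.List.slice s (some ((k : Int) + 3)) none]
    else []) := by
  rw [show ((k : Int) + 1) = ((k + 1 : Nat) : Int) by push_cast; ring,
      show ((k : Int) + 2) = ((k + 2 : Nat) : Int) by push_cast; ring,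
      show ((k : Int) + 3) = ((k + 3 : Nat) : Int) by push_cast; ring]
  simp only [PySem.List.slice_natCast, PySem.List.slice_zero_start, PySem.List.slice_to_natCast,
    PySem.List.slice_from_natCast, PySem.List.pyGetD_natCast]
  rw [show k + 3 - k = 3 by omega, window3 s k hk]
  simp only [List.cons.injEq, and_true]

-- a window shorter than 3 characters produces no move on A's side

-- a window shorter than 3 characters produces no move on A's side
lemma movesA_short (s : List Char) (k : Nat) (hk : s.length ≤ k + 2) :
    (if PySem.List.slice s (some (k : Int)) (some ((k : Int) + 3)) = ['o', 'o', '-'] then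
      [PySem.List.slice s (some 0) (some (k : Int)) ++ ['-', '-', 'o'] ++
       PySem.List.slice s (some ((k : Int) + 3)) none]
    else if PySem.List.slice s (some (k : Int)) (some ((k : Int) + 3)) = ['-', 'o', 'o'] then
      [PySem.List.slice s (some 0) (some (k : Int)) ++ ['o', '-', '-'] ++
       PySem.List.slice s (some ((k : Int) + 3)) none]
    else []) = [] := by
  rw [show ((k : Int) + 3) = ((k + 3 : Nat) : Int) by push_cast; ring]
  rw [PySem.List.slice_natCast, show k + 3 - k = 3 by omega]
  rw [if_neg (window_short s k hk).1, if_neg (window_short s k hk).2]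

-- dropping range positions whose windows yield no move

-- dropping range positions whose windows yield no move
lemma flatMap_append_nil {α β : Type} (l1 l2 : List α) (f : α → List β)
    (h : ∀ x ∈ l2, f x = []) : (l1 ++ l2).flatMap f = l1.flatMap f := by
  rw [List.flatMap_append, List.flatMap_eq_nil_iff.mpr h, List.append_nil]

-- B's per-state successor list coincides with A's (cited by goB's termination proof)

-- B's per-state successor list coincides with A's (cited by goB's termination proof)
lemma succsB_eq (s : List Char) : succsB s = succsA s := by
  rw [succsB_eq_flatMap, succsA_eq_flatMap]
  have hmem : ∀ i : Int, i ∈ PySem.List.pyRange 0 (min 10 ((s.length : Int) - 2)) 1 →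
      ∃ k : Nat, i = (k : Int) ∧ k + 2 < s.length := by
    intro i hi
    rw [PySem.List.mem_pyRange_one] at hi
    refine ⟨i.toNat, (Int.toNat_of_nonneg hi.1).symm, ?_⟩
    have h2 := lt_min_iff.mp hi.2
    omega
  by_cases hc : (10 : Int) ≤ (s.length : Int) - 2
  · rw [min_eq_left hc] at hmem ⊢
    refine (List.flatMap_congr ?_).symm
    intro i hi
    obtain ⟨k, rfl, hk⟩ := hmem i hi
    exact movesAB_full s k hk
  · by_cases h0 : min 10 ((s.length : Int) - 2) ≤ 0
    · have hL2 : (s.length : Int) - 2 ≤ 0 := by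
        by_contra h
        exact absurd (lt_min (by norm_num) (not_le.mp h)) (not_lt.mpr h0)
      rw [PySem.List.pyRange_one_eq_nil h0, List.flatMap_nil]
      symm
      refine List.flatMap_eq_nil_iff.mpr ?_
      intro i hi
      rw [PySem.List.mem_pyRange_one] at hi
      obtain ⟨k, rfl⟩ : ∃ k : Nat, i = (k : Int) :=
        ⟨i.toNat, (Int.toNat_of_nonneg hi.1).symm⟩
      exact movesA_short s k (by omega)
    · have ht : min 10 ((s.length : Int) - 2) = (s.length : Int) - 2 := by omega
      conv_rhs => rw [PySem.List.pyRange_one_append 0 (min 10 ((s.length : Int) - 2)) 10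
        (by omega) (by rw [ht]; omega)]
      rw [flatMap_append_nil _ _ _ ?hnil]
      case hnil =>
        intro i hi
        rw [PySem.List.mem_pyRange_one] at hi
        obtain ⟨k, rfl⟩ : ∃ k : Nat, i = (k : Int) :=
          ⟨i.toNat, (Int.toNat_of_nonneg (by rw [ht] at hi; omega)).symm⟩
        refine movesA_short s k ?_
        have := hi.1
        rw [ht] at this
        omega
      refine (List.flatMap_congr ?_).symm
      intro i hi
      obtain ⟨k, rfl, hk⟩ := hmem i hi
      exact movesAB_full s k hk

-- the stack measure strictly drops when a state's successors replace it

-- the stack measure strictly drops when a state's successors replace it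
lemma succs_measure (s : List Char) (h : succsB s ≠ []) :
    ((succsB s).map fun t => 11 ^ t.count 'o').sum < 11 ^ s.count 'o' := by
  rw [succsB_eq] at h ⊢
  obtain ⟨m0, mt, heq⟩ := List.exists_cons_of_ne_nil h
  have hc : 1 ≤ s.count 'o' := by
    have := succsA_count s m0 (by rw [heq]; exact List.mem_cons_self ..)
    omega
  have hbound : ∀ x ∈ (succsA s).map fun t => 11 ^ t.count 'o',
      x ≤ 11 ^ (s.count 'o' - 1) := by
    intro x hx
    simp only [List.mem_map] at hx
    obtain ⟨m, hm, rfl⟩ := hx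
    have := succsA_count s m hm
    have : m.count 'o' = s.count 'o' - 1 := by omega
    rw [this]
  have hsum := List.sum_le_card_nsmul _ _ hbound
  have hlen : ((succsA s).map fun t => 11 ^ t.count 'o').length ≤ 10 := by
    simpa using succsA_len_le s
  have hpow : 11 ^ s.count 'o' = 11 ^ (s.count 'o' - 1) * 11 := by
    rw [← pow_succ]
    congr 1
    omega
  have hpos : 0 < 11 ^ (s.count 'o' - 1) := Nat.pow_pos (by norm_num)
  calc ((succsA s).map fun t => 11 ^ t.count 'o').sum
      ≤ ((succsA s).map fun t => 11 ^ t.count 'o').length * 11 ^ (s.count 'o' - 1) := by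
        simpa [smul_eq_mul] using hsum
    _ ≤ 10 * 11 ^ (s.count 'o' - 1) := by
        exact Nat.mul_le_mul_right _ hlen
    _ < 11 ^ s.count 'o' := by rw [hpow]; omega

-- the DFS loop of B: stack head = Python's stack top; `stack.extend(moves)` makes the
-- LAST appended move the next popped one, i.e. the reversed move list goes on top

-- value of an Option Int accumulator in WithTop Int (⊤ = Python's `best is None`)
def valO (o : Option Int) : WithTop Int := o.elim ⊤ (fun v => (v : WithTop Int))

lemma valO_eq_coe (o : Option Int) (v : Int) (h : valO o = (v : WithTop Int)) :
    o = some v := by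
  cases o with
  | none => simp [valO] at h
  | some w => simpa [valO, WithTop.coe_inj] using h

lemma foldl_min_swap {α : Type} [LinearOrder α] (l : List α) (a x : α) :
    l.foldl min (min a x) = min x (l.foldl min a) := by
  induction l generalizing a with
  | nil => simp [min_comm]
  | cons y t ih =>
      simp only [List.foldl_cons]
      rw [show min (min a x) y = min (min a y) x by
            rw [min_assoc, min_assoc, min_comm x y], ih]

lemma foldl_min_reverse {α : Type} [LinearOrder α] (l : List α) (a : α) :
    l.reverse.foldl min a = l.foldl min a := by
  induction l generalizing a with
  | nil => rfl
  | cons x t ih =>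
      simp only [List.reverse_cons, List.foldl_append, List.foldl_cons, List.foldl_nil, ih]
      rw [foldl_min_swap]
      exact min_comm _ _

lemma foldl_min_coe (l : List Int) (x : Int) :
    (l.map (fun (v : Int) => (v : WithTop Int))).foldl min (x : WithTop Int) =
      ((l.foldl min x : Int) : WithTop Int) := by
  induction l generalizing x with
  | nil => rfl
  | cons y t ih =>
      simp only [List.map_cons, List.foldl_cons]
      rw [← WithTop.coe_min]
      exact ih (min x y)

-- characterisations of dpA by the shape of its move list

-- enough fuel given, dpA does not depend on the exact amount
lemma dpA_congr (f1 : Nat) : ∀ (b : List Char) (f2 : Nat), b.count 'o' < f1 →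
    b.count 'o' < f2 → dpA f1 b = dpA f2 b := by
  induction f1 with
  | zero => intro b f2 h1; omega
  | succ g1 ih =>
      intro b f2 h1 h2
      obtain ⟨g2, rfl⟩ : ∃ g2, f2 = g2 + 1 := ⟨f2 - 1, by omega⟩
      simp only [dpA]
      by_cases hm : succsA b = []
      · simp [hm]
      · rw [if_neg hm, if_neg hm]
        congr 2
        refine List.map_congr_left ?_
        intro m hmem
        have hc := succsA_count b m hmem
        exact ih m g2 (by omega) (by omega)

-- the value dpA computes, at its canonical fuel
def dpF (b : List Char) : Int := dpA (b.count 'o' + 1) b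

lemma dpF_terminal (b : List Char) (h : succsA b = []) :
    dpF b = ((PySem.Chars.count b ['o'] : Nat) : Int) := by
  unfold dpF
  simp [dpA, h]

lemma dpF_step (b : List Char) (m0 : List Char) (mt : List (List Char))
    (h : succsA b = m0 :: mt) :
    dpF b = (mt.map dpF).foldl min (dpF m0) := by
  have hmap : (m0 :: mt).map (dpA (b.count 'o')) = (m0 :: mt).map dpF := by
    refine List.map_congr_left ?_
    intro m hmem
    have hc := succsA_count b m (h ▸ hmem)
    exact dpA_congr _ m _ (by omega) (by omega)
  have h1 : dpF b = (PySem.List.min? ((m0 :: mt).map (dpA (b.count 'o'))) (fun x => x)).getD 0 := by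
    show dpA (b.count 'o' + 1) b = _
    simp only [dpA]
    rw [h, if_neg (List.cons_ne_nil m0 mt)]
  rw [h1, hmap, List.map_cons, PySem.List.min?_id_cons, Option.getD_some]

-- the DFS accumulates exactly the minimum of dpF over the stack (given enough fuel)
lemma goB_eq (fuel : Nat) : ∀ (stack : List (List Char)) (best : Option Int),
    ((stack.map fun t => 11 ^ t.count 'o').sum < fuel) →
    valO (goB fuel stack best) =
      stack.foldl (fun a s => min a ((dpF s : Int) : WithTop Int)) (valO best) := by
  induction fuel with
  | zero => intro stack best h; omega
  | succ fuel ih =>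
      intro stack best hfuel
      match stack with
      | [] => rfl
      | s :: rest =>
        have hpos : 0 < 11 ^ s.count 'o' := Nat.pow_pos (by norm_num)
        simp only [List.map_cons, List.sum_cons] at hfuel
        by_cases h : succsB s = []
        · simp only [goB, if_pos h]
          rw [ih rest _ (by omega), List.foldl_cons]
          have hd : dpF s = ((PySem.Chars.count s ['o'] : Nat) : Int) :=
            dpF_terminal s (by rw [← succsB_eq]; exact h)
          congr 1
          cases best with
          | none => simp [valO, hd]
          | some v =>
              simp only [valO, Option.elim]
              split_ifs with hlt
              · rw [hd, ← WithTop.coe_min, WithTop.coe_inj]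
                omega
              · rw [hd, ← WithTop.coe_min, WithTop.coe_inj]
                omega
        · simp only [goB, if_neg h]
          have hms := succs_measure s h
          have hnew : (((succsB s).reverse ++ rest).map fun t => 11 ^ t.count 'o').sum < fuel := by
            simp only [List.map_append, List.sum_append, List.map_reverse, List.sum_reverse]
            omega
          rw [ih _ _ hnew, List.foldl_append, List.foldl_cons]
          congr 1
          have h' : succsA s ≠ [] := by rw [← succsB_eq]; exact h
          obtain ⟨m0, mt, heq⟩ := List.exists_cons_of_ne_nil h'
          rw [succsB_eq, heq]
          rw [show ∀ (l : List (List Char)) (a : WithTop Int),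
                l.foldl (fun a s => min a ((dpF s : Int) : WithTop Int)) a =
                  (l.map (fun m => ((dpF m : Int) : WithTop Int))).foldl min a from
                fun l a => (List.foldl_map).symm]
          rw [List.map_reverse, foldl_min_reverse, List.map_cons, List.foldl_cons,
              min_comm (valO best) ((dpF m0 : Int) : WithTop Int), foldl_min_swap,
              show (fun m => ((dpF m : Int) : WithTop Int)) =
                (fun (v : Int) => (v : WithTop Int)) ∘ dpF from rfl,
              ← List.map_map, foldl_min_coe, ← dpF_step s m0 mt heq]

-- ===== VERDICT (by name: the statement is the Claim_ definition above) =====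
theorem dp_spec : Claim_equal_dp := by
  intro board _
  unfold Spec_dp dp dp_alt
  have hpos : 0 < 11 ^ board.toList.count 'o' := Nat.pow_pos (by norm_num)
  have h := goB_eq (11 ^ board.toList.count 'o' + 1) [board.toList] none
    (by simp only [List.map_cons, List.map_nil, List.sum_cons, List.sum_nil]; omega)
  simp only [List.foldl_cons, List.foldl_nil] at h
  have h2 : valO (goB (11 ^ board.toList.count 'o' + 1) [board.toList] none) =
      ((dpF board.toList : Int) : WithTop Int) := by
    rw [h]; simp [valO]
  rw [valO_eq_coe _ _ h2]
  rfl
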